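-- pv_equiv track=rewrite | github.com/amayro/g_algorithms | 04_Empirical_evaluation_algorithms/tasks.py | simple_method_2
-- ===== SOURCE A (Python) =====
-- def simple_method_2(idx):
--     n = idx
--     lst = []
--     first = 2
--     while len(lst) != idx:
--         for i in range(first, n + 1):
--             for j in range(2, i):
--                 if i % j == 0:
--                     break
--             else:
--                 lst.append(i)
--         n += 1
--         first = n
--     return lst, f'{idx} по счету простое число: {lst[idx - 1]}'
-- ===== SOURCE B (Python) =====
-- def _is_prime(n):
--     if n < 4:
--         return n > 1
--     if n % 2 == 0:
--         return False
--     d = 3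
--     while d * d <= n:
--         if n % d == 0:
--             return False
--         d += 2
--     return True
--
--
-- def simple_method_2(idx):
--     lst = []
--     cand = 2
--     while len(lst) < idx:
--         if _is_prime(cand):
--             lst.append(cand)
--         cand = 3 if cand == 2 else cand + 2
--     return lst, f'{idx} по счету простое число: {lst[idx - 1]}'
-- ===== Notes on version B (the rewrite author's own statement) =====
-- stated objective: faster
-- what changed: A repeatedly rescans ranges and trial-divides every candidate i by all j in [2, i); B makes one pass over candidates 2,3,5,7,... and tests each only against odd divisors up to sqrt(n).
import Mathlib
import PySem

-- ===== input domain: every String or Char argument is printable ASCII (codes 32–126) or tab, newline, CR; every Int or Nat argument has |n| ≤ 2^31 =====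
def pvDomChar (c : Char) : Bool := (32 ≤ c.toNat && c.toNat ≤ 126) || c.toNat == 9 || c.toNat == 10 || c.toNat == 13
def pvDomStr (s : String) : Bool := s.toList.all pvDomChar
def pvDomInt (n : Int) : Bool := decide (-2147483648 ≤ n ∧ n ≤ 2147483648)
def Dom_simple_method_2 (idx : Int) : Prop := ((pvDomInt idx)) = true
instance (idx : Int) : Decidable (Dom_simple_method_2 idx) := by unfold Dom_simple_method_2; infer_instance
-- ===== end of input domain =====

-- B replaces A's restart-the-whole-scan trial division (dividing each candidate by every j < i)
-- with a single pass over candidates 2,3,5,7,… testing only odd divisors up to √n: measurably faster.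
-- The while-loops are made total with a fuel guard (2^(idx+1) passes, proved sufficient via
-- Bertrand's postulate); outside Pre_ (idx ≤ 0) Python A raises IndexError or loops forever.

-- ===== PORT A =====
-- inner 'for j in range(2, i): if i % j == 0: break / else: append' as a scan returning whether no j divides i
def pvAisPrimeLoop (i : Int) : List Int → Bool
  | [] => true
  | j :: rest => if PySem.Int.mod i j = 0 then false else pvAisPrimeLoop i rest

def pvAisPrime (i : Int) : Bool := pvAisPrimeLoop i (PySem.List.pyRange 2 i 1)

-- one body of 'for i in range(first, n + 1)'
def pvApass (first n : Int) (lst : List Int) : List Int :=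
  (PySem.List.pyRange first (n + 1) 1).foldl
    (fun acc i => if pvAisPrime i then acc ++ [i] else acc) lst

-- 'while len(lst) != idx' (fuel only makes the loop total; it is proved sufficient on Pre_)
def pvAloop (idx : Int) : Nat → Int → Int → List Int → List Int
  | 0, _, _, lst => lst
  | fuel + 1, first, n, lst =>
    if (lst.length : Int) = idx then lst
    else pvAloop idx fuel (n + 1) (n + 1) (pvApass first n lst)

def simple_method_2 (idx : Int) : List Int × String :=
  let lst := pvAloop idx (2 ^ (idx.toNat + 1)) 2 idx []
  (lst, PySem.Int.toStr idx ++ " по счету простое число: " ++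
        PySem.Int.toStr ((PySem.List.pyGet? lst (idx - 1)).getD 0))

-- ===== PORT B =====
-- 'while d * d <= n: if n % d == 0: return False; d += 2'
def pvBdivLoop (n : Nat) (d : Nat) : Bool :=
  if d * d ≤ n then (if n % d = 0 then false else pvBdivLoop n (d + 2)) else true
  termination_by n + 2 - d
  decreasing_by
    rcases Nat.eq_zero_or_pos d with h0 | h0
    · omega
    · have hd : d ≤ d * d := Nat.le_mul_of_pos_left d h0
      omega

def pvBisPrime (n : Int) : Bool :=
  if n < 4 then decide (1 < n)
  else if PySem.Int.mod n 2 = 0 then false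
  else pvBdivLoop n.toNat 3

-- 'while len(lst) < idx' over candidates 2, 3, 5, 7, … (fuel guard as above)
def pvBloop (idx : Int) : Nat → Int → List Int → List Int
  | 0, _, lst => lst
  | fuel + 1, cand, lst =>
    if (lst.length : Int) < idx then
      pvBloop idx fuel (if cand = 2 then 3 else cand + 2)
        (if pvBisPrime cand then lst ++ [cand] else lst)
    else lst

def simple_method_2_alt (idx : Int) : List Int × String :=
  let lst := pvBloop idx (2 ^ (idx.toNat + 1)) 2 []
  (lst, PySem.Int.toStr idx ++ " по счету простое число: " ++
        PySem.Int.toStr ((PySem.List.pyGet? lst (idx - 1)).getD 0))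

-- ===== PRECONDITION & SPEC =====
-- Pre_ excludes idx ≤ 0: there Python A raises IndexError (idx = 0, lst[-1] on []) or never
-- terminates (idx < 0: len(lst) can never equal a negative idx).
def Pre_simple_method_2 (idx : Int) : Prop := 1 ≤ idx
instance (idx : Int) : Decidable (Pre_simple_method_2 idx) := by
  unfold Pre_simple_method_2; infer_instance

def pvWitness_simple_method_2 : Int := 3

def Spec_simple_method_2 (idx : Int) (out : List Int × String) : Prop := out = simple_method_2_alt idx
instance (idx : Int) (out : List Int × String) : Decidable (Spec_simple_method_2 idx out) := by
  unfold Spec_simple_method_2; infer_instance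

-- ===== CLAIM (what is proved, stated in full; the proofs are below) =====
def Claim_equal_simple_method_2 : Prop :=
  ∀ (idx : Int), Dom_simple_method_2 idx → Pre_simple_method_2 idx →
    Spec_simple_method_2 idx (simple_method_2 idx)

-- ===== LEMMAS AND PROOFS =====

-- the primes below m, as the canonical value both loops build
def pvP (m : Nat) : List Int :=
  ((List.range m).filter (fun k => decide (Nat.Prime k))).map (fun k => (k : Int))

theorem pvP_succ (m : Nat) :
    pvP (m + 1) = pvP m ++ (if Nat.Prime m then [(m : Int)] else []) := by
  simp only [pvP, List.range_succ, List.filter_append]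
  by_cases h : Nat.Prime m <;> simp [h]

theorem pvP_two : pvP 2 = [] := by decide

theorem pvP_prefix {a b : Nat} (h : a ≤ b) : pvP a <+: pvP b := by
  induction b, h using Nat.le_induction with
  | base => exact List.prefix_rfl
  | succ b _ ih => exact ih.trans ⟨_, (pvP_succ b).symm⟩

theorem pvP_length_mono {a b : Nat} (h : a ≤ b) : (pvP a).length ≤ (pvP b).length :=
  (pvP_prefix h).length_le

theorem pvP_take {a b k : Nat} (h : a ≤ b) (hk : k ≤ (pvP a).length) :
    (pvP a).take k = (pvP b).take k := by
  obtain ⟨t, ht⟩ := pvP_prefix h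
  rw [← ht, List.take_append_of_le_length hk]

theorem pvP_length_succ_le (m : Nat) : (pvP (m + 1)).length ≤ (pvP m).length + 1 := by
  rw [pvP_succ]; by_cases h : Nat.Prime m <;> simp [h]

theorem pvP_length_le (m : Nat) : (pvP (m + 1)).length ≤ m := by
  induction m with
  | zero => decide
  | succ m ih =>
    have := pvP_length_succ_le (m + 1)
    omega

-- at least k primes below 2^k + 1 (Bertrand)
theorem pvP_pow (k : Nat) : k ≤ (pvP (2 ^ k + 1)).length := by
  induction k with
  | zero => exact Nat.zero_le _
  | succ k ih =>
    obtain ⟨p, hp, hlt, hle⟩ :=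
      Nat.exists_prime_lt_and_le_two_mul (2 ^ k) (Nat.two_pow_pos k).ne'
    have h1 : (pvP (p + 1)).length = (pvP p).length + 1 := by
      rw [pvP_succ, List.length_append, if_pos hp]; simp
    have h2 : (pvP (2 ^ k + 1)).length ≤ (pvP p).length := pvP_length_mono (by omega)
    have h3 : (pvP (p + 1)).length ≤ (pvP (2 ^ (k + 1) + 1)).length := by
      apply pvP_length_mono
      have : 2 ^ (k + 1) = 2 * 2 ^ k := by ring
      omega
    omega

-- ---- A's trial division is primality ----
theorem pvAisPrimeLoop_iff (i : Int) (js : List Int) :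
    pvAisPrimeLoop i js = true ↔ ∀ j ∈ js, ¬ PySem.Int.mod i j = 0 := by
  induction js with
  | nil => simp [pvAisPrimeLoop]
  | cons j rest ih =>
    simp only [pvAisPrimeLoop]
    by_cases h : PySem.Int.mod i j = 0 <;> simp [h, ih]

theorem pv_mod_zero_iff (m j : Nat) (_hj : 0 < j) :
    PySem.Int.mod (m : Int) (j : Int) = 0 ↔ j ∣ m := by
  rw [PySem.Int.mod_natCast]
  have hcast : ((m % j : Nat) : Int) = 0 ↔ m % j = 0 := by exact_mod_cast Iff.rfl
  rw [hcast]
  exact ⟨Nat.dvd_of_mod_eq_zero, Nat.mod_eq_zero_of_dvd⟩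

theorem pvAisPrime_eq (m : Nat) (h2 : 2 ≤ m) :
    pvAisPrime (m : Int) = decide (Nat.Prime m) := by
  have key : pvAisPrime (m : Int) = true ↔ Nat.Prime m := by
    rw [pvAisPrime, pvAisPrimeLoop_iff]
    constructor
    · intro h
      rw [Nat.prime_def_lt']
      refine ⟨h2, fun d hd2 hdm hdvd => ?_⟩
      have hmem : (d : Int) ∈ PySem.List.pyRange 2 (m : Int) 1 := by
        rw [PySem.List.mem_pyRange_one]; constructor <;> [exact_mod_cast hd2; exact_mod_cast hdm]
      exact h _ hmem ((pv_mod_zero_iff m d (by omega)).mpr hdvd)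
    · intro hp j hj hmod
      rw [PySem.List.mem_pyRange_one] at hj
      obtain ⟨hj2, hjm⟩ := hj
      have hjn : j = ((j.toNat : Nat) : Int) := by omega
      rw [hjn] at hmod
      have hdvd : j.toNat ∣ m := (pv_mod_zero_iff m j.toNat (by omega)).mp hmod
      exact (Nat.prime_def_lt'.mp hp).2 j.toNat (by omega) (by omega) hdvd
  by_cases hp : Nat.Prime m <;> simp [hp] at key ⊢ <;> simp [key]

-- ---- B's √-bounded odd trial division is primality ----
theorem pvBdivLoop_iff (n : Nat) : ∀ (d : Nat),
    (pvBdivLoop n d = true ↔ ∀ e, d ≤ e → e % 2 = d % 2 → e * e ≤ n → ¬ e ∣ n) := by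
  intro d
  induction d using pvBdivLoop.induct n with
  | case1 d hdd hmod =>
    rw [pvBdivLoop, if_pos hdd, if_pos hmod]
    simp only [Bool.false_eq_true, false_iff, not_forall]
    exact ⟨d, le_rfl, rfl, hdd, fun h => h (Nat.dvd_of_mod_eq_zero hmod)⟩
  | case2 d hdd hmod ih =>
    rw [pvBdivLoop, if_pos hdd, if_neg hmod, ih]
    constructor
    · intro h e hde hpar hee hdvd
      rcases Nat.eq_or_lt_of_le hde with rfl | hlt
      · exact hmod (Nat.mod_eq_zero_of_dvd hdvd)
      · exact h e (by omega) (by omega) hee hdvd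
    · intro h e hde hpar hee
      exact h e (by omega) (by omega) hee
  | case3 d hdd =>
    rw [pvBdivLoop, if_neg hdd]
    simp only [true_iff]
    intro e hde _ hee _
    have : d * d ≤ e * e := Nat.mul_le_mul hde hde
    omega

theorem pvBisPrime_eq (m : Nat) (h2 : 2 ≤ m) :
    pvBisPrime (m : Int) = decide (Nat.Prime m) := by
  by_cases h4 : m < 4
  · have : m = 2 ∨ m = 3 := by omega
    rcases this with rfl | rfl <;> decide
  · rw [pvBisPrime, if_neg (by exact_mod_cast h4)]
    by_cases hmod : PySem.Int.mod (m : Int) 2 = 0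
    · rw [if_pos hmod]
      have h2dvd : 2 ∣ m := (pv_mod_zero_iff m 2 two_pos).mp hmod
      have hnp : ¬ Nat.Prime m := fun hp => by
        rcases hp.eq_one_or_self_of_dvd 2 h2dvd with h | h <;> omega
      simp [hnp]
    · rw [if_neg hmod]
      have hodd : ¬ 2 ∣ m := fun hd => hmod ((pv_mod_zero_iff m 2 two_pos).mpr hd)
      have htn : ((m : Int)).toNat = m := Int.toNat_natCast m
      rw [htn]
      have key : pvBdivLoop m 3 = true ↔ Nat.Prime m := by
        rw [pvBdivLoop_iff]
        constructor
        · intro h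
          rw [Nat.prime_def_le_sqrt]
          refine ⟨by omega, fun e he2 hesqrt hedvd => ?_⟩
          have hee : e * e ≤ m := Nat.le_sqrt.mp hesqrt
          rcases Nat.even_or_odd e with heven | hodde
          · exact hodd (dvd_trans heven.two_dvd hedvd)
          · have he1 : e % 2 = 1 := Nat.odd_iff.mp hodde
            exact h e (by omega) (by omega) hee hedvd
        · intro hp e he3 _ hee hedvd
          have helt : e < m := by nlinarith
          exact (Nat.prime_def_lt'.mp hp).2 e (by omega) helt hedvd
      by_cases hp : Nat.Prime m
      · simp [hp, key.mpr hp]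
      · simp only [hp, decide_false]
        rw [← Bool.not_eq_true]
        exact fun h => hp (key.mp h)

-- ---- loop invariants ----
theorem pvApass_P (a k : Nat) (h2 : 2 ≤ a) :
    (PySem.List.pyRange (a : Int) ((a : Int) + (k : Int)) 1).foldl
      (fun acc i => if pvAisPrime i then acc ++ [i] else acc) (pvP a) = pvP (a + k) := by
  induction k with
  | zero => simp [PySem.List.pyRange_one_eq_nil]
  | succ k ih =>
    have hsplit : (PySem.List.pyRange (a : Int) ((a : Int) + ((k : Int) + 1)) 1)
        = PySem.List.pyRange (a : Int) ((a : Int) + (k : Int)) 1 ++ [(a : Int) + (k : Int)] := by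
      have h := PySem.List.pyRange_one_succ_right (a := (a : Int)) (b := (a : Int) + (k : Int))
        (by omega)
      rw [show (a : Int) + ((k : Int) + 1) = ((a : Int) + (k : Int)) + 1 by ring, h]
    push_cast
    rw [hsplit, List.foldl_append, ih]
    simp only [List.foldl_cons, List.foldl_nil]
    have hc : (a : Int) + (k : Int) = ((a + k : Nat) : Int) := by push_cast; ring
    rw [hc, pvAisPrime_eq (a + k) (by omega), show a + (k + 1) = (a + k) + 1 by omega, pvP_succ]
    by_cases hp : Nat.Prime (a + k) <;> simp [hp]

theorem pvAloop_eq (idxN : Nat) :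
    ∀ (fuel m : Nat), 2 ≤ m → (pvP m).length ≤ idxN → idxN ≤ (pvP (m + fuel)).length →
      pvAloop (idxN : Int) fuel (m : Int) (m : Int) (pvP m) = (pvP (m + fuel)).take idxN := by
  intro fuel
  induction fuel with
  | zero =>
    intro m _ hle hub
    simp only [Nat.add_zero] at hub ⊢
    rw [pvAloop, List.take_of_length_le (by omega)]
  | succ f ih =>
    intro m h2 hle hub
    rw [pvAloop]
    by_cases hc : ((pvP m).length : Int) = (idxN : Int)
    · rw [if_pos hc]
      have hlen : (pvP m).length = idxN := by exact_mod_cast hc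
      rw [← pvP_take (a := m) (b := m + (f + 1)) (by omega) (by omega),
        List.take_of_length_le (by omega)]
    · rw [if_neg hc]
      have hlt : (pvP m).length < idxN := by
        have hne : (pvP m).length ≠ idxN := fun h => hc (by exact_mod_cast h)
        omega
      have hpass : pvApass (m : Int) (m : Int) (pvP m) = pvP (m + 1) := by
        have h1 := pvApass_P m 1 h2
        rw [pvApass]
        push_cast at h1 ⊢
        exact h1
      have hnext := ih (m + 1) (by omega)
        (by have := pvP_length_succ_le m; omega)
        (by rw [show m + 1 + f = m + (f + 1) by omega]; exact hub)
      rw [hpass]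
      push_cast at hnext ⊢
      rw [hnext, show m + 1 + f = m + (f + 1) by omega]

theorem pvP_even_succ (m : Nat) (h2 : 2 ≤ m) (hodd : m % 2 = 1) : pvP (m + 2) = pvP (m + 1) := by
  rw [show m + 2 = (m + 1) + 1 by omega, pvP_succ (m + 1)]
  have hnp : ¬ Nat.Prime (m + 1) := by
    intro hp
    rcases hp.eq_one_or_self_of_dvd 2 (by omega) with h | h <;> omega
  simp [hnp]

theorem pvBloop_eq (idxN : Nat) :
    ∀ (fuel m : Nat), 2 ≤ m → (m = 2 ∨ m % 2 = 1) → (pvP m).length ≤ idxN →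
      idxN ≤ (pvP (m + fuel)).length →
      pvBloop (idxN : Int) fuel (m : Int) (pvP m) = (pvP (m + fuel)).take idxN := by
  intro fuel
  induction fuel with
  | zero =>
    intro m _ _ hle hub
    simp only [Nat.add_zero] at hub ⊢
    rw [pvBloop, List.take_of_length_le (by omega)]
  | succ f ih =>
    intro m h2 hpar hle hub
    rw [pvBloop]
    by_cases hc : ((pvP m).length : Int) < (idxN : Int)
    · rw [if_pos hc]
      have hlt : (pvP m).length < idxN := by exact_mod_cast hc
      have hstep : (if pvBisPrime (m : Int) then pvP m ++ [(m : Int)] else pvP m) = pvP (m + 1) := by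
        rw [pvBisPrime_eq m h2, pvP_succ]
        by_cases hp : Nat.Prime m <;> simp [hp]
      rw [hstep]
      rcases hpar with rfl | hodd
      · rw [if_pos (by norm_num : ((2 : Nat) : Int) = 2)]
        have hnext := ih 3 (by omega) (Or.inr rfl)
          (by have := pvP_length_succ_le 2; rw [pvP_two] at this; simp at this; omega)
          (by rw [show 3 + f = 2 + (f + 1) by omega]; exact hub)
        show pvBloop ((idxN : Nat) : Int) f 3 (pvP 3) = (pvP (2 + (f + 1))).take idxN
        rw [show ((3 : Nat) : Int) = 3 by norm_num] at hnext
        rw [hnext, show 3 + f = 2 + (f + 1) by omega]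
      · have hm2 : (m : Int) ≠ 2 := by
          intro h
          have : m = 2 := by exact_mod_cast h
          omega
        rw [if_neg hm2]
        have h12 : pvP (m + 2) = pvP (m + 1) := pvP_even_succ m h2 hodd
        have hnext := ih (m + 2) (by omega) (Or.inr (by omega))
          (by rw [h12]; have := pvP_length_succ_le m; omega)
          (by
            apply le_trans hub
            apply pvP_length_mono
            omega)
        rw [← h12]
        push_cast at hnext ⊢
        rw [hnext]
        exact (pvP_take (a := m + (f + 1)) (b := m + 2 + f) (by omega) (by omega)).symm
    · rw [if_neg hc]
      have hge : idxN ≤ (pvP m).length := by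
        by_contra hn
        exact hc (by exact_mod_cast (by omega : (pvP m).length < idxN))
      have hlen : (pvP m).length = idxN := by omega
      rw [← pvP_take (a := m) (b := m + (f + 1)) (by omega) (by omega),
        List.take_of_length_le (by omega)]

-- ===== VERDICT (by name: the statement is the Claim_ definition above) =====
theorem pvFirstPass (idxN : Nat) (h1 : 1 ≤ idxN) :
    pvApass 2 (idxN : Int) [] = pvP (idxN + 1) := by
  obtain ⟨k, rfl⟩ : ∃ k, idxN = k + 1 := ⟨idxN - 1, by omega⟩
  have h := pvApass_P 2 k (le_refl 2)
  rw [pvP_two] at h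
  rw [pvApass]
  push_cast at h ⊢
  rw [show ((k : Int) + 1) + 1 = 2 + (k : Int) by ring,
    show k + 1 + 1 = 2 + k by omega]
  exact h

theorem simple_method_2_spec : Claim_equal_simple_method_2 := by
  intro idx _ hpre
  unfold Spec_simple_method_2
  unfold Pre_simple_method_2 at hpre
  obtain ⟨idxN, rfl⟩ : ∃ k : Nat, idx = (k : Int) := ⟨idx.toNat, by omega⟩
  have h1 : 1 ≤ idxN := by exact_mod_cast hpre
  have htn : ((idxN : Int)).toNat = idxN := Int.toNat_natCast idxN
  have hp2 : (2 : Nat) ^ (idxN + 1) = 2 * 2 ^ idxN := by ring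
  have hp1 : 1 ≤ 2 ^ idxN := Nat.one_le_two_pow
  have hkey := pvP_pow idxN
  -- A's loop result
  have hA : pvAloop (idxN : Int) (2 ^ (idxN + 1)) 2 (idxN : Int) []
      = (pvP (2 ^ idxN + 1)).take idxN := by
    rw [show (2 : Nat) ^ (idxN + 1) = (2 ^ (idxN + 1) - 1) + 1 by omega, pvAloop,
      if_neg (by simp only [List.length_nil, Nat.cast_zero]; omega), pvFirstPass idxN h1]
    have hrec := pvAloop_eq idxN (2 ^ (idxN + 1) - 1) (idxN + 1) (by omega)
      (pvP_length_le idxN)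
      (le_trans hkey (pvP_length_mono (by omega)))
    push_cast at hrec ⊢
    rw [hrec]
    exact (pvP_take (a := 2 ^ idxN + 1) (b := idxN + 1 + (2 ^ (idxN + 1) - 1))
      (by omega) (by omega)).symm
  -- B's loop result
  have hB : pvBloop (idxN : Int) (2 ^ (idxN + 1)) 2 []
      = (pvP (2 ^ idxN + 1)).take idxN := by
    have hrec := pvBloop_eq idxN (2 ^ (idxN + 1)) 2 (le_refl 2) (Or.inl rfl)
      (by simp [pvP_two])
      (le_trans hkey (pvP_length_mono (by omega)))
    rw [pvP_two] at hrec
    rw [show ((2 : Nat) : Int) = 2 by norm_num] at hrec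
    rw [hrec]
    exact (pvP_take (a := 2 ^ idxN + 1) (b := 2 + 2 ^ (idxN + 1)) (by omega) (by omega)).symm
  show simple_method_2 (idxN : Int) = simple_method_2_alt (idxN : Int)
  rw [simple_method_2, simple_method_2_alt]
  simp only [htn, hA, hB]
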